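-- pv_equiv track=rewrite | github.com/josephchengyx/aoc2021 | day20/day20.py | enhance_img
-- ===== SOURCE A (Python) =====
-- def copy_arr(arr):
--     return [[elem for elem in row] for row in arr]
--
-- def empty_arr(x_range, y_range, default):
--     return [[default for _ in range(x_range)] for _ in range(y_range)]
--
-- def pixel_to_bit(pixel):
--     mapping = {'.': 0, '#': 1}
--     return mapping[pixel]
--
-- def get_width_and_height(img):
--     width, height = len(img[0]), len(img)
--     return width, height
--
-- def enhance_img(input, algo, iters):
--     def get_neighbours(x, y):
--         return [(x+dx, y+dy) for dy in range(-1, 2) for dx in range(-1, 2)]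
--
--     def get_pixel(x, y):
--         if 0 <= x < width and 0 <= y < height:
--             return img[y][x]
--         else:
--             return default_pixel
--
--     def convolve(x, y):
--         neighbours = get_neighbours(x, y)
--         bitcode = list()
--         for px, py in neighbours:
--             pixel = get_pixel(px, py)
--             digit = pixel_to_bit(pixel)
--             bitcode.append(str(digit))
--         bitcode = int(''.join(bitcode), 2)
--         return algo[bitcode]
--
--     def process_background(default_pixel):
--         if default_pixel == '.':
--             return algo[0]
--         else: # default_pixel == '#'
--             return algo[-1]
--
--     img = copy_arr(input)
--     width, height = get_width_and_height(img)
--     default_pixel = '.'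
--
--     for _ in range(iters):
--         output = empty_arr(width+2, height+2, '')
--         for y in range(-1, height+1):
--             for x in range(-1, width+1):
--                 output[y+1][x+1] = convolve(x, y)
--         default_pixel = process_background(default_pixel)
--         img = output
--         width, height = get_width_and_height(img)
--
--     return [''.join(row) for row in img]
-- ===== SOURCE B (Python) =====
-- def enhance_img(input, algo, iters):
--     # Pad once to the final bounding box (originals grow by one per pass, so the
--     # final canvas is known up front) and enhance that fixed boolean canvas in
--     # place-sized passes; each row's 9-bit lookup index is built incrementally
--     # from three sliding 3-bit column codes via a small spread table, instead of
--     # gathering and parsing nine neighbours per cell.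
--     if iters <= 0:
--         return list(input)
--     p = iters
--     h0, w0 = len(input), len(input[0])
--     H, W = h0 + 2 * p, w0 + 2 * p
--     grid = [[p <= y < p + h0 and p <= x < p + w0 and input[y - p][x - p] == '#'
--              for x in range(W)] for y in range(H)]
--     spread = (0, 1, 8, 9, 64, 65, 72, 73)  # 3-bit column code -> its row-major bit positions
--     bg = False
--     for _ in range(iters):
--         def col(y, x):
--             def at(yy, xx):
--                 return grid[yy][xx] if 0 <= yy < H and 0 <= xx < W else bg
--             return 4 * at(y - 1, x) + 2 * at(y, x) + at(y + 1, x)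
--         new = []
--         for y in range(H):
--             cm, cr = col(y, -1), col(y, 0)
--             row = []
--             for x in range(W):
--                 cl, cm, cr = cm, cr, col(y, x + 1)
--                 row.append(algo[4 * spread[cl] + 2 * spread[cm] + spread[cr]] == '#')
--             new.append(row)
--         grid = new
--         bg = algo[511 if bg else 0] == '#'
--     return [''.join('#' if v else '.' for v in row) for row in grid]
-- ===== Notes on version B (the rewrite author's own statement) =====
-- stated objective: alternative
-- what changed: B pads the image once into a fixed boolean canvas of the final bounding-box size (instead of A's grow-by-one grid rebuilt and re-indexed every pass) and computes each 9-bit lookup index incrementally per row from three sliding 3-bit column codes via a spread table, instead of A's per-cell gather of nine neighbours built into a binary string and re-parsed with int(...,2). Pre_ excludes A's crash inputs (empty image, rows shorter than the first, non-'.#' pixels, an algo a 9-bit index overruns) and otherwise restricts to the natural domain of a well-formed 512-entry '.'/'#' enhancement table; …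
-- outside the precondition, e.g. on enhance_img(['.'], 'x', 1): A returns ['xxx', 'xxx', 'xxx'], B returns ['...', '...', '...']; on enhance_img(['.'], '.', 1): A returns ['...', '...', '...'], B returns ['...', '...', '...']
import Mathlib
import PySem

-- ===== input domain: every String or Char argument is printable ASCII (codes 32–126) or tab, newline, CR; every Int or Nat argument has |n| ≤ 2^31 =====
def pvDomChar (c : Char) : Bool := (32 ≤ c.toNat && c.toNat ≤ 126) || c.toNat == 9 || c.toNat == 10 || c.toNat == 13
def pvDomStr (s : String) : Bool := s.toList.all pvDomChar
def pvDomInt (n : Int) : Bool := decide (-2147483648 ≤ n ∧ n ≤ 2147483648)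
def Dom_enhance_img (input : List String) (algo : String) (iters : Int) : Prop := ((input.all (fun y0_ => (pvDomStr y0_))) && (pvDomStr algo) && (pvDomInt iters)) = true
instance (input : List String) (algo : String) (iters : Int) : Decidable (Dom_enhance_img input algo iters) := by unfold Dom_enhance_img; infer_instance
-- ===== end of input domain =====

-- B pads the image once into a fixed boolean canvas of the final bounding-box size and builds each
-- 9-bit index incrementally from three sliding column codes, instead of A's grow-by-one char grid
-- with a per-cell 9-neighbour gather parsed from a binary string (an alternative of similar cost).
-- Return value only; neither implementation mutates its arguments.

-- ===== PORT A =====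
-- helpers of A's module, ported step for step (cells are Python str values: 1-char strings)
def copy_arr (arr : List String) : List (List String) :=
  arr.map (fun row => row.toList.map (fun c => String.ofList [c]))

def empty_arr (x_range y_range : Int) (default : String) : List (List String) :=
  (PySem.List.pyRange 0 y_range 1).map (fun _ => (PySem.List.pyRange 0 x_range 1).map (fun _ => default))

def pixel_to_bit (pixel : String) : Int :=
  ((PySem.Dict.ofList [(".", (0 : Int)), ("#", 1)]).get? pixel).getD 0
  -- mapping[pixel]; the KeyError (none) is excluded by Pre_, collapsed with getD

def get_width_and_height (img : List (List String)) : Int × Int :=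
  (PySem.List.len ((PySem.List.pyGet? img 0).getD []), PySem.List.len img)
  -- len(img[0]): the IndexError on an empty img is excluded by Pre_, collapsed with getD

def get_neighbours (x y : Int) : List (Int × Int) :=
  (PySem.List.pyRange (-1) 2 1).flatMap (fun dy =>
    (PySem.List.pyRange (-1) 2 1).map (fun dx => (x + dx, y + dy)))

def get_pixel (img : List (List String)) (width height : Int) (default_pixel : String)
    (x y : Int) : String :=
  if 0 ≤ x ∧ x < width ∧ 0 ≤ y ∧ y < height then
    ((PySem.List.pyGet? img y).bind (fun row => PySem.List.pyGet? row x)).getD default_pixel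
    -- img[y][x]: in range under Pre_ (rows have length ≥ width); getD collapses the excluded IndexError
  else default_pixel

def convolve (img : List (List String)) (width height : Int) (default_pixel : String)
    (algo : String) (x y : Int) : String :=
  let neighbours := get_neighbours x y
  let bitcode : List String :=
    neighbours.foldl (fun acc p =>
      acc ++ [PySem.Int.toStr (pixel_to_bit (get_pixel img width height default_pixel p.1 p.2))]) []
  let bitcode : Int := (PySem.Int.ofStrBase? (PySem.Str.join "" bitcode) 2).getD 0
  -- int(''.join(bitcode), 2); the string is nine '0'/'1' digits, so never a ValueError
  match PySem.Str.pyGet? algo bitcode with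
  | some c => String.ofList [c]   -- algo[bitcode] is a 1-char string
  | none => ""                -- IndexError: excluded by Pre_ (len(algo) = 512)

def process_background (algo : String) (default_pixel : String) : String :=
  if default_pixel = "." then
    match PySem.Str.pyGet? algo 0 with | some c => String.ofList [c] | none => ""
  else -- default_pixel == '#'
    match PySem.Str.pyGet? algo (-1) with | some c => String.ofList [c] | none => ""
  -- algo[0] / algo[-1]: the IndexError on an empty algo is excluded by Pre_

-- the body of A's 'for _ in range(iters)' loop (width/height are recomputed from img exactly
-- as A's get_width_and_height calls do)
def stepA (algo : String) (st : List (List String) × String) (_i : Int) :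
    List (List String) × String :=
  let img := st.1
  let default_pixel := st.2
  let wh := get_width_and_height img
  let width := wh.1
  let height := wh.2
  let output :=
    (PySem.List.pyRange (-1) (height + 1) 1).foldl (fun out y =>
      (PySem.List.pyRange (-1) (width + 1) 1).foldl (fun out x =>
        PySem.List.pySetD out (y + 1)
          (PySem.List.pySetD ((PySem.List.pyGet? out (y + 1)).getD []) (x + 1)
            (convolve img width height default_pixel algo x y))) out)
      (empty_arr (width + 2) (height + 2) "")
    -- output[y+1][x+1] = convolve(x, y): empty_arr's rows are fresh lists (no aliasing), so the
    -- assignment is read row (y+1), set element (x+1), write the row back; both indices are ≥ 0 here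
  (output, process_background algo default_pixel)

def enhance_img (input : List String) (algo : String) (iters : Int) : List String :=
  let img := copy_arr input
  let st := (PySem.List.pyRange 0 iters 1).foldl (stepA algo) (img, ".")
  st.1.map (fun row => PySem.Str.join "" row)   -- [''.join(row) for row in img]

-- ===== PORT B =====
def bI (b : Bool) : Int := if b then 1 else 0   -- a Python bool used in arithmetic

-- grid[yy][xx] if in range else bg (B's local `at`)
def bAt (grid : List (List Bool)) (H W : Int) (bg : Bool) (yy xx : Int) : Bool :=
  if 0 ≤ yy ∧ yy < H ∧ 0 ≤ xx ∧ xx < W then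
    ((PySem.List.pyGet? grid yy).bind (fun r => PySem.List.pyGet? r xx)).getD false
    -- in range by the guard; getD collapses the impossible none
  else bg

-- B's local `col`: the 3-bit column code at column x of row y
def bCol (grid : List (List Bool)) (H W : Int) (bg : Bool) (y x : Int) : Int :=
  4 * bI (bAt grid H W bg (y - 1) x) + 2 * bI (bAt grid H W bg y x) + bI (bAt grid H W bg (y + 1) x)

def spreadT : List Int := [0, 1, 8, 9, 64, 65, 72, 73]

def sp (c : Int) : Int := (PySem.List.pyGet? spreadT c).getD 0
  -- spread[c]: c is always in [0, 8), getD collapses the impossible IndexError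

-- B's inner x-loop: state (cm, cr, row), sliding the three column codes one step per cell
def bRow (algo : String) (grid : List (List Bool)) (H W : Int) (bg : Bool) (y : Int) : List Bool :=
  ((PySem.List.pyRange 0 W 1).foldl (fun st x =>
      let cl := st.1
      let cm := st.2.1
      let cr := bCol grid H W bg y (x + 1)
      (cm, cr, st.2.2 ++ [((PySem.Str.pyGet? algo (4 * sp cl + 2 * sp cm + sp cr)).getD ' ') == '#']))
    (bCol grid H W bg y (-1), bCol grid H W bg y 0, ([] : List Bool))).2.2
  -- algo[...]: the index is in [0, 512); IndexError excluded by Pre_ (len(algo) = 512), getD collapses it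

-- the body of B's 'for _ in range(iters)' loop; the canvas size (H, W) is fixed
def stepB (algo : String) (H W : Int) (st : List (List Bool) × Bool) (_i : Int) :
    List (List Bool) × Bool :=
  let grid := st.1
  let bg := st.2
  let new := (PySem.List.pyRange 0 H 1).foldl (fun acc y => acc ++ [bRow algo grid H W bg y]) []
  (new, ((PySem.Str.pyGet? algo (if bg then 511 else 0)).getD ' ') == '#')

def enhance_img_alt (input : List String) (algo : String) (iters : Int) : List String :=
  if iters ≤ 0 then input   -- list(input)
  else
    let p := iters
    let h0 : Int := PySem.List.len input
    let w0 : Int := PySem.Str.len ((PySem.List.pyGet? input 0).getD "")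
    -- len(input[0]): IndexError on an empty image excluded by Pre_
    let H := h0 + 2 * p
    let W := w0 + 2 * p
    let grid : List (List Bool) :=
      (PySem.List.pyRange 0 H 1).map (fun y =>
        (PySem.List.pyRange 0 W 1).map (fun x =>
          if p ≤ y ∧ y < p + h0 ∧ p ≤ x ∧ x < p + w0 then
            (((PySem.List.pyGet? input (y - p)).bind (fun s => PySem.Str.pyGet? s (x - p))).getD ' ') == '#'
            -- input[y-p][x-p], only evaluated in range (Python's short-circuit `and`)
          else false))
    let st := (PySem.List.pyRange 0 iters 1).foldl (stepB algo H W) (grid, false)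
    st.1.map (fun row => PySem.Str.join "" (row.map (fun v => if v then "#" else ".")))

-- ===== PRECONDITION & SPEC =====
-- Pre_ excludes A's crash inputs (an empty image; rows shorter than the first row; non-'.'/'#'
-- pixels in the scanned box; an algo a 9-bit index can overrun) and otherwise restricts to the
-- function's natural domain: an enhancement algorithm is a well-formed 512-entry table over
-- '.'/'#'; on longer or wider-alphabet tables A still returns values B does not reproduce
-- (see the claim's cites).
def Pre_enhance_img (input : List String) (algo : String) (iters : Int) : Prop :=
  input ≠ [] ∧
  (1 ≤ iters →
    (∀ s ∈ input, input.headI.toList.length ≤ s.toList.length ∧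
        ∀ c ∈ s.toList.take input.headI.toList.length, c = '.' ∨ c = '#') ∧
    algo.toList.length = 512 ∧ (∀ c ∈ algo.toList, c = '.' ∨ c = '#'))
instance (input : List String) (algo : String) (iters : Int) :
    Decidable (Pre_enhance_img input algo iters) := by unfold Pre_enhance_img; infer_instance

def pvWitness_enhance_img : List String × String × Int := (["#.", ".#"], ".", 0)

def Spec_enhance_img (input : List String) (algo : String) (iters : Int) (out : List String) : Prop := out = enhance_img_alt input algo iters
instance (input : List String) (algo : String) (iters : Int) (out : List String) : Decidable (Spec_enhance_img input algo iters out) := by unfold Spec_enhance_img; infer_instance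

-- ===== CLAIM (what is proved, stated in full; the proofs are below) =====
def Claim_equal_enhance_img : Prop := ∀ (input : List String) (algo : String) (iters : Int), Dom_enhance_img input algo iters → Pre_enhance_img input algo iters → Spec_enhance_img input algo iters (enhance_img input algo iters)

-- ===== LEMMAS AND PROOFS =====

-- proof-side vocabulary -------------------------------------------------------
def bchar (b : Bool) : Char := if b then '#' else '.'

def aBit (algo : String) (n : Int) : Bool := ((PySem.Str.pyGet? algo n).getD ' ') == '#'

-- the background bit after k passes
def bgB (algo : String) : Nat → Bool
  | 0 => false
  | k + 1 => aBit algo (if bgB algo k then 511 else 0)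

def bgStr (algo : String) (k : Nat) : String := String.ofList [bchar (bgB algo k)]

def inBox (W0 H0 k : Nat) (x y : Int) : Bool :=
  decide (-(k : Int) ≤ x ∧ x < (W0 : Int) + k ∧ -(k : Int) ≤ y ∧ y < (H0 : Int) + k)

-- the 9-bit convolution index of picture p at (x, y), row-major
def idx9 (p : Int → Int → Bool) (x y : Int) : Int :=
  ((((((((bI (p (x-1) (y-1))) * 2 + bI (p x (y-1))) * 2 + bI (p (x+1) (y-1))) * 2
    + bI (p (x-1) y)) * 2 + bI (p x y)) * 2 + bI (p (x+1) y)) * 2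
    + bI (p (x-1) (y+1))) * 2 + bI (p x (y+1))) * 2 + bI (p (x+1) (y+1))

-- the (extended) infinite picture after k passes, in original coordinates
def Q (input : List String) (algo : String) : Nat → Int → Int → Bool
  | 0, x, y =>
    if 0 ≤ x ∧ x < (input.headI.toList.length : Int) ∧ 0 ≤ y ∧ y < (input.length : Int) then
      (((PySem.List.pyGet? input y).bind (fun s => PySem.Str.pyGet? s x)).getD ' ') == '#'
    else false
  | k + 1, x, y =>
    if inBox input.headI.toList.length input.length (k + 1) x y then
      aBit algo (idx9 (Q input algo k) x y)
    else bgB algo (k + 1)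

def algoOK (algo : String) : Prop :=
  algo.toList.length = 512 ∧ ∀ c ∈ algo.toList, c = '.' ∨ c = '#'

def rowsOK (input : List String) : Prop :=
  ∀ s ∈ input, input.headI.toList.length ≤ s.toList.length ∧
    ∀ c ∈ s.toList.take input.headI.toList.length, c = '.' ∨ c = '#'

-- outside the k-grown box the picture is the background
theorem Q_out (input : List String) (algo : String) (k : Nat) (x y : Int)
    (h : inBox input.headI.toList.length input.length k x y = false) :
    Q input algo k x y = bgB algo k := by
  cases k with
  | zero =>
    unfold inBox at h
    rw [decide_eq_false_iff_not] at h
    simp only [Q, bgB]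
    rw [if_neg]
    omega
  | succ k =>
    simp only [Q, h, Bool.false_eq_true, if_false]

-- every pass is the convolution, even on the frozen background
theorem Q_succ_eq_conv (input : List String) (algo : String) (k : Nat) (x y : Int) :
    Q input algo (k + 1) x y = aBit algo (idx9 (Q input algo k) x y) := by
  by_cases h : inBox input.headI.toList.length input.length (k + 1) x y
  · simp only [Q, if_pos h]
  · have hf : inBox input.headI.toList.length input.length (k + 1) x y = false := by
      simpa using h
    have e : ∀ u v : Int, x - 1 ≤ u → u ≤ x + 1 → y - 1 ≤ v → v ≤ y + 1 →
        Q input algo k u v = bgB algo k := by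
      intro u v h1 h2 h3 h4
      apply Q_out
      unfold inBox at hf ⊢
      rw [decide_eq_false_iff_not] at hf ⊢
      omega
    have hi : idx9 (Q input algo k) x y = if bgB algo k then 511 else 0 := by
      unfold idx9
      rw [e (x-1) (y-1) (by omega) (by omega) (by omega) (by omega),
        e x (y-1) (by omega) (by omega) (by omega) (by omega),
        e (x+1) (y-1) (by omega) (by omega) (by omega) (by omega),
        e (x-1) y (by omega) (by omega) (by omega) (by omega),
        e x y (by omega) (by omega) (by omega) (by omega),
        e (x+1) y (by omega) (by omega) (by omega) (by omega),
        e (x-1) (y+1) (by omega) (by omega) (by omega) (by omega),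
        e x (y+1) (by omega) (by omega) (by omega) (by omega),
        e (x+1) (y+1) (by omega) (by omega) (by omega) (by omega)]
      cases bgB algo k <;> simp [bI]
    rw [Q_out input algo (k + 1) x y hf, hi]
    rfl

theorem idx9_bounds (p : Int → Int → Bool) (x y : Int) :
    0 ≤ idx9 p x y ∧ idx9 p x y < 512 := by
  unfold idx9
  rcases Bool.dichotomy (p (x-1) (y-1)) with h0 | h0 <;>
  rcases Bool.dichotomy (p x (y-1)) with h1 | h1 <;>
  rcases Bool.dichotomy (p (x+1) (y-1)) with h2 | h2 <;>
  rcases Bool.dichotomy (p (x-1) y) with h3 | h3 <;>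
  rcases Bool.dichotomy (p x y) with h4 | h4 <;>
  rcases Bool.dichotomy (p (x+1) y) with h5 | h5 <;>
  rcases Bool.dichotomy (p (x-1) (y+1)) with h6 | h6 <;>
  rcases Bool.dichotomy (p x (y+1)) with h7 | h7 <;>
  rcases Bool.dichotomy (p (x+1) (y+1)) with h8 | h8 <;>
    simp [h0, h1, h2, h3, h4, h5, h6, h7, h8, bI]

theorem joinSingletons (l : List Char) :
    PySem.Str.join "" (l.map (fun c => String.ofList [c])) = String.ofList l := by
  have h : (PySem.Str.join "" (l.map (fun c => String.ofList [c]))).toList = l := by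
    rw [PySem.Str.toList_join]
    simp only [List.map_map]
    have : (String.toList ∘ fun c => String.ofList [c]) = fun c => [c] := by
      funext c; simp [String.toList_ofList]
    rw [this]
    exact PySem.Chars.join_nil_singletons l
  have h2 := congrArg String.ofList h
  rwa [String.ofList_toList] at h2

def b2i (b : Bool) : Int := if b then 1 else 0

theorem parse2' : ∀ b0 b1 b2 b3 b4 b5 b6 b7 b8 : Bool,
    (PySem.Int.ofStrBase? (PySem.Str.join "" [PySem.Int.toStr (b2i b0), PySem.Int.toStr (b2i b1),
      PySem.Int.toStr (b2i b2), PySem.Int.toStr (b2i b3), PySem.Int.toStr (b2i b4),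
      PySem.Int.toStr (b2i b5), PySem.Int.toStr (b2i b6), PySem.Int.toStr (b2i b7),
      PySem.Int.toStr (b2i b8)]) 2).getD 0
    = (((((((b2i b0*2+b2i b1)*2+b2i b2)*2+b2i b3)*2+b2i b4)*2+b2i b5)*2+b2i b6)*2+b2i b7)*2+b2i b8 := by
  decide

theorem parse2 (b0 b1 b2 b3 b4 b5 b6 b7 b8 : Int)
    (h0 : b0 = 0 ∨ b0 = 1) (h1 : b1 = 0 ∨ b1 = 1) (h2 : b2 = 0 ∨ b2 = 1)
    (h3 : b3 = 0 ∨ b3 = 1) (h4 : b4 = 0 ∨ b4 = 1) (h5 : b5 = 0 ∨ b5 = 1)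
    (h6 : b6 = 0 ∨ b6 = 1) (h7 : b7 = 0 ∨ b7 = 1) (h8 : b8 = 0 ∨ b8 = 1) :
    (PySem.Int.ofStrBase? (PySem.Str.join "" [PySem.Int.toStr b0, PySem.Int.toStr b1,
      PySem.Int.toStr b2, PySem.Int.toStr b3, PySem.Int.toStr b4, PySem.Int.toStr b5,
      PySem.Int.toStr b6, PySem.Int.toStr b7, PySem.Int.toStr b8]) 2).getD 0
    = (((((((b0*2+b1)*2+b2)*2+b3)*2+b4)*2+b5)*2+b6)*2+b7)*2+b8 := by
  have e : ∀ b : Int, b = 0 ∨ b = 1 → b = b2i (b = 1) := by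
    rintro b (rfl | rfl) <;> simp [b2i]
  rw [e b0 h0, e b1 h1, e b2 h2, e b3 h3, e b4 h4, e b5 h5, e b6 h6, e b7 h7, e b8 h8]
  exact parse2' _ _ _ _ _ _ _ _ _

-- the in-place fill loop over a fresh row writes every entry once: it is a map
theorem set_fill {α : Type} (f : Nat → α) :
    ∀ (n : Nat) (row : List α), n ≤ row.length →
    (List.range n).foldl (fun r k => r.set k (f k)) row = (List.range n).map f ++ row.drop n := by
  intro n
  induction n with
  | zero => simp
  | succ n ih =>
    intro row hle
    rw [List.range_succ, List.foldl_append, ih row (by omega)]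
    simp only [List.foldl_cons, List.foldl_nil]
    have hn : n < row.length := by omega
    have hx : ¬ (n < ((List.range n).map f).length) := by simp
    rw [List.set_append, if_neg hx]
    simp only [List.length_map, List.length_range, Nat.sub_self]
    rw [List.drop_eq_getElem_cons hn, List.set_cons_zero]
    simp [List.map_append]

-- same, one level up: each outer iteration rewrites row k from its (still fresh) current value
theorem set_fill2 {α : Type} (F : Nat → List α → List α) (f : Nat → List α) :
    ∀ (n : Nat) (out : List (List α)) (_ : n ≤ out.length)
      (_ : ∀ k (hk : k < n), F k out[k] = f k),
    (List.range n).foldl (fun o k => o.set k (F k ((PySem.List.pyGet? o (k : Int)).getD []))) out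
      = (List.range n).map f ++ out.drop n := by
  intro n
  induction n with
  | zero => simp
  | succ n ih =>
    intro out hle hread
    rw [List.range_succ, List.foldl_append,
      ih out (by omega) (fun k hk => hread k (by omega))]
    simp only [List.foldl_cons, List.foldl_nil]
    have hn : n < out.length := by omega
    have hget : (PySem.List.pyGet? ((List.range n).map f ++ out.drop n) (n : Int)).getD []
        = out[n] := by
      rw [PySem.List.pyGet?_natCast]
      rw [List.getElem?_append_right (by simp)]
      simp [hn]
    rw [hget, hread n (by omega)]
    have hx : ¬ (n < ((List.range n).map f).length) := by simp
    rw [List.set_append, if_neg hx]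
    simp only [List.length_map, List.length_range, Nat.sub_self]
    rw [List.drop_eq_getElem_cons hn, List.set_cons_zero]
    simp [List.map_append]

theorem fill_row {α : Type} (w : Int) (hw : 0 ≤ w) (g : Int → α) (row : List α)
    (hlen : row.length = (w + 2).toNat) :
    (PySem.List.pyRange (-1) (w + 1) 1).foldl (fun r x => PySem.List.pySetD r (x + 1) (g x)) row
      = (PySem.List.pyRange (-1) (w + 1) 1).map g := by
  rw [PySem.List.pyRange_one, List.foldl_map, List.map_map]
  have hN : ((w + 1) - (-1)).toNat = (w + 2).toNat := by omega
  refine Eq.trans (PySem.List.foldl_congr_mem _ _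
    (fun (r : List α) (k : Nat) => r.set k (g (-1 + (k : Int)))) _ ?_) ?_
  · intro acc k _
    show PySem.List.pySetD acc ((-1 : Int) + (k : Int) + 1) _ = _
    rw [show ((-1 : Int) + (k : Int) + 1) = ((k : Nat) : Int) from by ring,
      PySem.List.pySetD_natCast]
  · rw [set_fill (fun k => g (-1 + (k : Int))) _ row (by omega)]
    have hd : row.drop (((w + 1) - (-1)).toNat) = [] := by
      apply List.drop_eq_nil_of_le; omega
    rw [hd, List.append_nil]
    simp [Function.comp]

-- a loop that re-reads row r, sets one cell and writes the row back, once per x, is one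
-- row-level fill of row r
theorem row_extract {α : Type} (r : Nat) (v : Int → α) :
    ∀ (l : List Int) (out : List (List α)),
    l.foldl (fun o x => PySem.List.pySetD o (r : Int)
        (PySem.List.pySetD ((PySem.List.pyGet? o (r : Int)).getD []) (x + 1) (v x))) out
      = out.set r (l.foldl (fun row x => PySem.List.pySetD row (x + 1) (v x))
          ((PySem.List.pyGet? out (r : Int)).getD [])) := by
  intro l
  induction l with
  | nil =>
    intro out
    by_cases hr : r < out.length
    · simp [PySem.List.pyGet?_natCast, List.getElem?_eq_getElem hr]
    · have hge : out.length ≤ r := by omega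
      simp [PySem.List.pyGet?_natCast, List.getElem?_eq_none hge, List.set_eq_of_length_le hge]
  | cons x l ih =>
    intro out
    simp only [List.foldl_cons]
    by_cases hr : r < out.length
    · have hget : (PySem.List.pyGet? out (r : Int)).getD [] = out[r] := by
        simp [PySem.List.pyGet?_natCast, List.getElem?_eq_getElem hr]
      rw [ih]
      rw [PySem.List.pySetD_natCast]
      have hget2 : (PySem.List.pyGet? (out.set r (PySem.List.pySetD out[r] ((x : Int) + 1) (v x))) (r : Int)).getD []
          = PySem.List.pySetD out[r] ((x : Int) + 1) (v x) := by
        simp [hr]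
      rw [hget, hget2, List.set_set]
    · have hge : out.length ≤ r := by omega
      have hnone : PySem.List.pyGet? out (r : Int) = none := by
        simp [PySem.List.pyGet?_natCast, List.getElem?_eq_none hge]
      have hsetd : ∀ (z : List α), PySem.List.pySetD out (r : Int) z = out := by
        intro z
        have : PySem.List.pySet? out (r : Int) z = none := by
          rw [PySem.List.pySet?_eq_none_iff]
          simp [PySem.Raise.InRange]; omega
        simp [PySem.List.pySetD, this]
      rw [hnone, hsetd, ih, hnone]
      simp only [Option.getD_none]
      have : PySem.List.pySetD ([] : List α) ((x : Int) + 1) (v x) = [] := by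
        have : PySem.List.pySet? ([] : List α) ((x : Int) + 1) (v x) = none := by
          rw [PySem.List.pySet?_eq_none_iff]
          simp [PySem.Raise.InRange]
        simp [PySem.List.pySetD, this]
      rw [this]

theorem fill_grid {α : Type} (w h : Int) (hw : 0 ≤ w) (hh : 0 ≤ h) (g : Int → Int → α) (d : α) :
    (PySem.List.pyRange (-1) (h + 1) 1).foldl (fun out y =>
        (PySem.List.pyRange (-1) (w + 1) 1).foldl (fun out x =>
          PySem.List.pySetD out (y + 1)
            (PySem.List.pySetD ((PySem.List.pyGet? out (y + 1)).getD []) (x + 1) (g x y))) out)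
      ((PySem.List.pyRange 0 (h + 2) 1).map (fun _ => (PySem.List.pyRange 0 (w + 2) 1).map (fun _ => d)))
    = (PySem.List.pyRange (-1) (h + 1) 1).map (fun y =>
        (PySem.List.pyRange (-1) (w + 1) 1).map (fun x => g x y)) := by
  rw [PySem.List.pyRange_one (-1) (h + 1), List.foldl_map, List.map_map]
  have hN : ((h + 1) - (-1)).toNat = (h + 2).toNat := by omega
  set row0 : List α := (PySem.List.pyRange 0 (w + 2) 1).map (fun _ => d) with hrow0
  have hrlen : row0.length = (w + 2).toNat := by
    simp [hrow0, PySem.List.pyRange_one]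
  set out0 : List (List α) := (PySem.List.pyRange 0 (h + 2) 1).map (fun _ => row0) with hout0
  have holen : out0.length = (h + 2).toNat := by
    simp [hout0, PySem.List.pyRange_one]
  have hoget : ∀ k (hk : k < out0.length), out0[k] = row0 := by
    intro k hk; simp [hout0]
  refine Eq.trans (PySem.List.foldl_congr_mem _ _
    (fun (o : List (List α)) (k : Nat) =>
      o.set k ((PySem.List.pyRange (-1) (w + 1) 1).foldl
        (fun r x => PySem.List.pySetD r (x + 1) (g x (-1 + (k : Int))))
        ((PySem.List.pyGet? o (k : Int)).getD [])))
    _ ?_) ?_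
  · intro acc k _
    simp only [show ((-1 : Int) + (k : Int) + 1) = ((k : Nat) : Int) from by ring]
    exact row_extract k _ _ acc
  rw [set_fill2
    (F := fun (k : Nat) (r : List α) => (PySem.List.pyRange (-1) (w + 1) 1).foldl
      (fun r x => PySem.List.pySetD r (x + 1) (g x (-1 + (k : Int)))) r)
    (f := fun (k : Nat) => (PySem.List.pyRange (-1) (w + 1) 1).map (fun x => g x (-1 + (k : Int))))
    _ out0 (by omega)
    (by intro k hk
        rw [hoget k (by omega)]
        exact fill_row w hw _ row0 hrlen)]
  have hd : out0.drop (((h + 1) - (-1)).toNat) = [] := by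
    apply List.drop_eq_nil_of_le; omega
  rw [hd, List.append_nil]
  simp [Function.comp]

-- reading one cell of a map-of-ranges grid
theorem read_grid {α : Type} (f : Int → Int → α) (Hn Wn : Nat) (x y : Int)
    (hx : 0 ≤ x) (hxW : x < (Wn : Int)) (hy : 0 ≤ y) (hyH : y < (Hn : Int)) :
    ((PySem.List.pyGet? ((List.range Hn).map (fun (Y : Nat) =>
        (List.range Wn).map (fun (X : Nat) => f (X : Int) (Y : Int)))) y).bind
      (fun row => PySem.List.pyGet? row x)) = some (f x y) := by
  have hyn : y.toNat < Hn := by omega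
  have hxn : x.toNat < Wn := by omega
  rw [PySem.List.pyGet?_of_nonneg _ hy, List.getElem?_map, List.getElem?_range hyn]
  simp only [Option.map_some, Option.bind_some]
  rw [PySem.List.pyGet?_of_nonneg _ hx, List.getElem?_map, List.getElem?_range hxn]
  simp only [Option.map_some]
  rw [Int.toNat_of_nonneg hx, Int.toNat_of_nonneg hy]

-- the dense grid A holds after k ≥ 1 passes
def gridC (input : List String) (algo : String) (k : Nat) : List (List String) :=
  (List.range (input.length + 2 * k)).map (fun (Y : Nat) =>
    (List.range (input.headI.toList.length + 2 * k)).map (fun (X : Nat) =>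
      String.ofList [bchar (Q input algo k ((X : Int) - k) ((Y : Int) - k))]))

-- the relation between an A-state (img, default_pixel) and pass number k
def InvA (input : List String) (algo : String) (st : List (List String) × String) (k : Nat) : Prop :=
  st.2 = bgStr algo k ∧
  st.1.length = input.length + 2 * k ∧
  ((PySem.List.pyGet? st.1 0).getD []).length = input.headI.toList.length + 2 * k ∧
  ∀ x y : Int, 0 ≤ x → x < (input.headI.toList.length : Int) + 2 * k →
    0 ≤ y → y < (input.length : Int) + 2 * k →
    ((PySem.List.pyGet? st.1 y).bind (fun row => PySem.List.pyGet? row x))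
      = some (String.ofList [bchar (Q input algo k (x - k) (y - k))])

theorem bchar_id (c : Char) (h : c = '.' ∨ c = '#') :
    String.ofList [bchar (c == '#')] = String.ofList [c] := by
  rcases h with rfl | rfl <;> rfl

theorem ptb (b : Bool) : pixel_to_bit (String.ofList [bchar b]) = bI b := by
  cases b <;> decide

theorem InvA_gridC (input : List String) (algo : String) (k : Nat) (hne : input ≠ []) :
    InvA input algo (gridC input algo k, bgStr algo k) k := by
  have hH : 0 < input.length := List.length_pos_iff.mpr hne
  refine ⟨rfl, by simp [gridC], ?_, ?_⟩
  · rw [PySem.List.pyGet?_zero]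
    unfold gridC
    rw [List.getElem?_map, List.getElem?_range (by omega)]
    simp only [Option.map_some, Option.getD_some, List.length_map, List.length_range]
  · intro x y hx hxW hy hyH
    unfold gridC
    exact read_grid (fun a b => String.ofList [bchar (Q input algo k (a - k) (b - k))])
      (input.length + 2 * k) (input.headI.toList.length + 2 * k) x y
      hx (by push_cast; omega) hy (by push_cast; omega)

theorem getbit (input : List String) (algo : String) (st : List (List String) × String) (k : Nat)
    (hInv : InvA input algo st k) (px py : Int) :
    pixel_to_bit (get_pixel st.1 ((input.headI.toList.length : Int) + 2 * k)
        ((input.length : Int) + 2 * k) (bgStr algo k) px py)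
      = bI (Q input algo k (px - k) (py - k)) := by
  unfold get_pixel
  split_ifs with h
  · rw [hInv.2.2.2 px py h.1 h.2.1 h.2.2.1 h.2.2.2]
    simp only [Option.getD_some]
    exact ptb _
  · have hf : inBox input.headI.toList.length input.length k (px - k) (py - k) = false := by
      unfold inBox
      rw [decide_eq_false_iff_not]
      omega
    rw [show bgStr algo k = String.ofList [bchar (bgB algo k)] from rfl, ptb,
      Q_out input algo k _ _ hf]

theorem convolve_eq (input : List String) (algo : String) (st : List (List String) × String)
    (k : Nat) (hA : algoOK algo) (hInv : InvA input algo st k) (x y : Int) :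
    convolve st.1 ((input.headI.toList.length : Int) + 2 * k) ((input.length : Int) + 2 * k)
        (bgStr algo k) algo x y
      = String.ofList [bchar (Q input algo (k + 1) (x - k) (y - k))] := by
  have hnb : get_neighbours x y =
      [(x + -1, y + -1), (x + 0, y + -1), (x + 1, y + -1),
       (x + -1, y + 0), (x + 0, y + 0), (x + 1, y + 0),
       (x + -1, y + 1), (x + 0, y + 1), (x + 1, y + 1)] := by
    unfold get_neighbours
    rw [show PySem.List.pyRange (-1) 2 1 = [-1, 0, 1] from by decide]
    rfl
  unfold convolve
  rw [hnb]
  simp only [List.foldl_cons, List.foldl_nil, List.nil_append, List.cons_append]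
  simp only [getbit input algo st k hInv]
  have hb : ∀ b : Bool, bI b = 0 ∨ bI b = 1 := by
    intro b
    cases b with
    | false => exact Or.inl rfl
    | true => exact Or.inr rfl
  rw [parse2 _ _ _ _ _ _ _ _ _ (hb _) (hb _) (hb _) (hb _) (hb _) (hb _) (hb _) (hb _) (hb _)]
  have e1 : x + -1 - (k : Int) = (x - k) - 1 := by ring
  have e2 : x + 0 - (k : Int) = x - k := by ring
  have e3 : x + 1 - (k : Int) = (x - k) + 1 := by ring
  have f1 : y + -1 - (k : Int) = (y - k) - 1 := by ring
  have f2 : y + 0 - (k : Int) = y - k := by ring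
  have f3 : y + 1 - (k : Int) = (y - k) + 1 := by ring
  rw [e1, e2, e3, f1, f2, f3]
  have hsum : (((((((bI (Q input algo k (x - k - 1) (y - k - 1)) * 2 +
      bI (Q input algo k (x - k) (y - k - 1))) * 2 +
      bI (Q input algo k (x - k + 1) (y - k - 1))) * 2 +
      bI (Q input algo k (x - k - 1) (y - k))) * 2 +
      bI (Q input algo k (x - k) (y - k))) * 2 +
      bI (Q input algo k (x - k + 1) (y - k))) * 2 +
      bI (Q input algo k (x - k - 1) (y - k + 1))) * 2 +
      bI (Q input algo k (x - k) (y - k + 1))) * 2 +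
      bI (Q input algo k (x - k + 1) (y - k + 1))
      = idx9 (Q input algo k) (x - k) (y - k) := by
    unfold idx9; ring_nf
  rw [hsum]
  obtain ⟨hlo, hhi⟩ := idx9_bounds (Q input algo k) (x - k) (y - k)
  have hlt : (idx9 (Q input algo k) (x - k) (y - k)).toNat < algo.toList.length := by
    rw [hA.1]; omega
  have hg : PySem.Str.pyGet? algo (idx9 (Q input algo k) (x - k) (y - k))
      = some (algo.toList[(idx9 (Q input algo k) (x - k) (y - k)).toNat]'hlt) := by
    rw [PySem.Str.pyGet?_eq, PySem.Chars.pyGet?_eq_listPyGet?,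
      PySem.List.pyGet?_of_nonneg _ hlo, List.getElem?_eq_getElem hlt]
  rw [hg]
  rw [Q_succ_eq_conv]
  have hab : aBit algo (idx9 (Q input algo k) (x - k) (y - k))
      = (algo.toList[(idx9 (Q input algo k) (x - k) (y - k)).toNat]'hlt == '#') := by
    unfold aBit; rw [hg]; rfl
  rw [hab, bchar_id _ (hA.2 _ (List.getElem_mem hlt))]

theorem pb_eq (algo : String) (hA : algoOK algo) (k : Nat) :
    process_background algo (bgStr algo k) = bgStr algo (k + 1) := by
  have hlen : algo.toList.length = 512 := hA.1
  have h511 : (511 : Nat) < algo.toList.length := by omega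
  have hg0 : PySem.Str.pyGet? algo 0 = some (algo.toList[0]'(by omega)) := by
    rw [PySem.Str.pyGet?_eq, PySem.Chars.pyGet?_eq_listPyGet?,
      PySem.List.pyGet?_of_nonneg _ le_rfl, List.getElem?_eq_getElem (by omega)]
    rfl
  have hg511 : PySem.Str.pyGet? algo 511 = some (algo.toList[511]'h511) := by
    rw [PySem.Str.pyGet?_eq, PySem.Chars.pyGet?_eq_listPyGet?,
      PySem.List.pyGet?_of_nonneg _ (by norm_num), List.getElem?_eq_getElem (by omega)]
    rfl
  have hgneg : PySem.Str.pyGet? algo (-1) = some (algo.toList[511]'h511) := by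
    rw [PySem.Str.pyGet?_eq, PySem.Chars.pyGet?_eq_listPyGet?, PySem.List.pyGet?_neg_one,
      List.getLast?_eq_getElem?, hlen]
    exact List.getElem?_eq_getElem (by omega)
  unfold process_background
  cases hbk : bgB algo k
  · rw [if_pos (by rw [bgStr, hbk]; rfl)]
    rw [hg0]
    have : bgB algo (k + 1) = aBit algo 0 := by rw [bgB, hbk]; rfl
    rw [bgStr, this]
    unfold aBit
    rw [hg0]
    exact (bchar_id _ (hA.2 _ (List.getElem_mem _))).symm
  · rw [if_neg (by rw [bgStr, hbk]; decide)]
    rw [hgneg]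
    have : bgB algo (k + 1) = aBit algo 511 := by rw [bgB, hbk]; rfl
    rw [bgStr, this]
    unfold aBit
    rw [hg511]
    exact (bchar_id _ (hA.2 _ (List.getElem_mem _))).symm

theorem stepA_eq (input : List String) (algo : String) (st : List (List String) × String)
    (k : Nat) (hne : input ≠ []) (hA : algoOK algo) (hInv : InvA input algo st k) (j : Int) :
    stepA algo st j = (gridC input algo (k + 1), bgStr algo (k + 1)) := by
  have hH : 0 < input.length := List.length_pos_iff.mpr hne
  have hW : get_width_and_height st.1 =
      ((input.headI.toList.length : Int) + 2 * k, (input.length : Int) + 2 * k) := by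
    unfold get_width_and_height
    rw [PySem.List.len_eq, PySem.List.len_eq, hInv.2.1, hInv.2.2.1]
    push_cast
    rfl
  simp only [stepA]
  rw [hW, hInv.1]
  dsimp only
  rw [Prod.mk.injEq]
  constructor
  · unfold empty_arr
    rw [fill_grid ((input.headI.toList.length : Int) + 2 * k) ((input.length : Int) + 2 * k)
      (by positivity) (by positivity)
      (fun x y => convolve st.1 ((input.headI.toList.length : Int) + 2 * k)
        ((input.length : Int) + 2 * k) (bgStr algo k) algo x y) ""]
    simp only [convolve_eq input algo st k hA hInv]
    rw [PySem.List.pyRange_one (-1) (((input.length : Int) + 2 * k) + 1),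
      PySem.List.pyRange_one (-1) (((input.headI.toList.length : Int) + 2 * k) + 1)]
    simp only [List.map_map]
    unfold gridC
    have hHn : ((((input.length : Int) + 2 * k) + 1) - (-1)).toNat = input.length + 2 * (k + 1) := by
      omega
    have hWn : ((((input.headI.toList.length : Int) + 2 * k) + 1) - (-1)).toNat
        = input.headI.toList.length + 2 * (k + 1) := by
      omega
    rw [hHn, hWn]
    apply List.map_congr_left
    intro Y _
    simp only [Function.comp]
    apply List.map_congr_left
    intro X _
    have c1 : (-1 : Int) + (X : Int) - (k : Int) = (X : Int) - ((k : Nat) + 1 : Nat) := by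
      push_cast; ring
    have c2 : (-1 : Int) + (Y : Int) - (k : Int) = (Y : Int) - ((k : Nat) + 1 : Nat) := by
      push_cast; ring
    simp only [Function.comp_apply]
    rw [c1, c2]
  · exact pb_eq algo hA k

theorem InvA_init (input : List String) (algo : String) (hne : input ≠ [])
    (hrows : rowsOK input) : InvA input algo (copy_arr input, ".") 0 := by
  refine ⟨rfl, by simp [copy_arr], ?_, ?_⟩
  · match input, hne with
    | hd :: tl, _ =>
      simp [copy_arr]
  · intro x y hx hxW hy hyH
    simp only [Nat.cast_zero, mul_zero, add_zero] at hxW hyH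
    have hyn : y.toNat < input.length := by omega
    unfold copy_arr
    rw [PySem.List.pyGet?_of_nonneg _ hy, List.getElem?_map,
      List.getElem?_eq_getElem hyn]
    simp only [Option.map_some, Option.bind_some]
    have hs := hrows input[y.toNat] (List.getElem_mem hyn)
    have hxn : x.toNat < input[y.toNat].toList.length := by omega
    rw [PySem.List.pyGet?_of_nonneg _ hx, List.getElem?_map,
      List.getElem?_eq_getElem hxn]
    simp only [Option.map_some, Option.some.injEq]
    have hmem : input[y.toNat].toList[x.toNat] ∈ input[y.toNat].toList.take input.headI.toList.length := by
      have hlt : x.toNat < (input[y.toNat].toList.take input.headI.toList.length).length := by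
        simp only [List.length_take]
        omega
      have he : (input[y.toNat].toList.take input.headI.toList.length)[x.toNat]'hlt
          = input[y.toNat].toList[x.toNat]'hxn := by
        rw [List.getElem_take]
      rw [← he]
      exact List.getElem_mem hlt
    have hc := hs.2 _ hmem
    have hq : Q input algo 0 (x - ((0 : Nat) : Int)) (y - ((0 : Nat) : Int))
        = (input[y.toNat].toList[x.toNat] == '#') := by
      rw [show x - ((0 : Nat) : Int) = x from by push_cast; ring,
        show y - ((0 : Nat) : Int) = y from by push_cast; ring]
      unfold Q
      rw [if_pos ⟨hx, hxW, hy, hyH⟩]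
      rw [PySem.List.pyGet?_of_nonneg _ hy, List.getElem?_eq_getElem hyn]
      simp only [Option.bind_some]
      rw [PySem.Str.pyGet?_eq, PySem.Chars.pyGet?_eq_listPyGet?,
        PySem.List.pyGet?_of_nonneg _ hx, List.getElem?_eq_getElem hxn]
      rfl
    rw [hq]
    exact (bchar_id _ hc).symm

-- a foldl whose function ignores the list element is an iterate
theorem foldl_ignore {α β : Type} (g : α → α) (f : α → β → α) (h : ∀ s b, f s b = g s) :
    ∀ (l : List β) (s : α), l.foldl f s = g^[l.length] s := by
  intro l
  induction l with
  | nil => intro s; rfl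
  | cons b l ih =>
    intro s
    rw [List.foldl_cons, h, ih, List.length_cons, Function.iterate_succ_apply]

theorem A_iter (input : List String) (algo : String) (hne : input ≠ [])
    (hrows : rowsOK input) (hA : algoOK algo) :
    ∀ k : Nat, 1 ≤ k →
      (fun s => stepA algo s 0)^[k] (copy_arr input, ".")
        = (gridC input algo k, bgStr algo k) := by
  intro k
  induction k with
  | zero => omega
  | succ k ih =>
    intro _
    rw [Function.iterate_succ_apply']
    by_cases hk : 1 ≤ k
    · rw [ih hk]
      exact stepA_eq input algo _ k hne hA (InvA_gridC input algo k hne) 0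
    · have hk0 : k = 0 := by omega
      subst hk0
      simp only [Function.iterate_zero_apply]
      exact stepA_eq input algo _ 0 hne hA (InvA_init input algo hne hrows) 0

-- the boolean canvas B holds after k passes (k ≤ i = the total pass count)
def gridB (input : List String) (algo : String) (i k : Nat) : List (List Bool) :=
  (List.range (input.length + 2 * i)).map (fun (Y : Nat) =>
    (List.range (input.headI.toList.length + 2 * i)).map (fun (X : Nat) =>
      Q input algo k ((X : Int) - i) ((Y : Int) - i)))

theorem bAt_eq (input : List String) (algo : String) (i k : Nat) (hki : k ≤ i) (yy xx : Int) :
    bAt (gridB input algo i k) ((input.length : Int) + 2 * i)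
        ((input.headI.toList.length : Int) + 2 * i) (bgB algo k) yy xx
      = Q input algo k (xx - i) (yy - i) := by
  unfold bAt
  split_ifs with h
  · unfold gridB
    rw [read_grid (fun a b => Q input algo k (a - i) (b - i))
      (input.length + 2 * i) (input.headI.toList.length + 2 * i) xx yy
      h.2.2.1 (by push_cast; omega) h.1 (by push_cast; omega)]
    simp only [Option.getD_some]
  · have hf : inBox input.headI.toList.length input.length k (xx - i) (yy - i) = false := by
      unfold inBox
      rw [decide_eq_false_iff_not]
      omega
    rw [Q_out input algo k _ _ hf]

theorem bCol_eq (input : List String) (algo : String) (i k : Nat) (hki : k ≤ i) (y x : Int) :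
    bCol (gridB input algo i k) ((input.length : Int) + 2 * i)
        ((input.headI.toList.length : Int) + 2 * i) (bgB algo k) y x
      = 4 * bI (Q input algo k (x - i) (y - 1 - i)) + 2 * bI (Q input algo k (x - i) (y - i))
        + bI (Q input algo k (x - i) (y + 1 - i)) := by
  unfold bCol
  rw [bAt_eq input algo i k hki (y - 1) x, bAt_eq input algo i k hki y x,
    bAt_eq input algo i k hki (y + 1) x]

theorem spread_idx : ∀ t1 m1 b1 t2 m2 b2 t3 m3 b3 : Bool,
    4 * sp (4 * bI t1 + 2 * bI m1 + bI b1) + 2 * sp (4 * bI t2 + 2 * bI m2 + bI b2)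
      + sp (4 * bI t3 + 2 * bI m3 + bI b3)
    = ((((((((bI t1) * 2 + bI t2) * 2 + bI t3) * 2 + bI m1) * 2 + bI m2) * 2 + bI m3) * 2
        + bI b1) * 2 + bI b2) * 2 + bI b3 := by
  decide

-- the sliding-window row fold, characterised
theorem slideAux (c : Int → Int) (g : Int → Int → Int → Bool) :
    ∀ (n : Nat) (a : Int) (acc : List Bool),
    (PySem.List.pyRange a (a + n) 1).foldl
      (fun st x => (st.2.1, c (x + 1), st.2.2 ++ [g st.1 st.2.1 (c (x + 1))]))
      (c (a - 1), c a, acc)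
    = (c (a + n - 1), c (a + n),
       acc ++ (PySem.List.pyRange a (a + n) 1).map (fun x => g (c (x - 1)) (c x) (c (x + 1)))) := by
  intro n
  induction n with
  | zero =>
    intro a acc
    rw [show a + ((0 : Nat) : Int) = a from by push_cast; ring]
    rw [PySem.List.pyRange_one_eq_nil le_rfl]
    simp
  | succ n ih =>
    intro a acc
    have hlt : a < a + ((n + 1 : Nat) : Int) := by push_cast; omega
    rw [PySem.List.pyRange_one_cons hlt]
    rw [List.foldl_cons, List.map_cons]
    have hshift : a + ((n + 1 : Nat) : Int) = (a + 1) + ((n : Nat) : Int) := by push_cast; ring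
    rw [hshift]
    have hstep := ih (a + 1) (acc ++ [g (c (a - 1)) (c a) (c (a + 1))])
    rw [show (a + 1) - 1 = a from by ring] at hstep
    rw [hstep]
    rw [List.append_assoc]
    rfl

theorem bRow_fold (algo : String) (grid : List (List Bool)) (H W : Int) (bg : Bool)
    (hW : 0 ≤ W) (y : Int) :
    bRow algo grid H W bg y = (PySem.List.pyRange 0 W 1).map (fun x =>
      ((PySem.Str.pyGet? algo (4 * sp (bCol grid H W bg y (x - 1)) + 2 * sp (bCol grid H W bg y x)
        + sp (bCol grid H W bg y (x + 1)))).getD ' ') == '#') := by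
  unfold bRow
  have h := slideAux (bCol grid H W bg y)
    (fun cl cm cr => ((PySem.Str.pyGet? algo (4 * sp cl + 2 * sp cm + sp cr)).getD ' ') == '#')
    W.toNat 0 []
  rw [show (0 : Int) + (W.toNat : Int) = W from by omega] at h
  rw [show (0 : Int) - 1 = -1 from by ring] at h
  rw [h]
  simp

theorem stepB_eq (input : List String) (algo : String) (i k : Nat) (hki : k ≤ i) (j : Int) :
    stepB algo ((input.length : Int) + 2 * i) ((input.headI.toList.length : Int) + 2 * i)
      (gridB input algo i k, bgB algo k) j
    = (gridB input algo i (k + 1), bgB algo (k + 1)) := by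
  simp only [stepB]
  rw [Prod.mk.injEq]
  constructor
  · rw [PySem.List.foldl_append_singleton_eq_map]
    rw [PySem.List.pyRange_one 0 ((input.length : Int) + 2 * i)]
    rw [List.map_map]
    conv_rhs => unfold gridB
    have hHn : (((input.length : Int) + 2 * i) - 0).toNat = input.length + 2 * i := by omega
    rw [hHn]
    apply List.map_congr_left
    intro Y _
    simp only [Function.comp_apply]
    rw [show (0 : Int) + (Y : Int) = (Y : Int) from by ring]
    rw [bRow_fold algo (gridB input algo i k) ((input.length : Int) + 2 * i)
      ((input.headI.toList.length : Int) + 2 * i) (bgB algo k) (by positivity) (Y : Int)]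
    rw [PySem.List.pyRange_one 0 ((input.headI.toList.length : Int) + 2 * i)]
    rw [List.map_map]
    have hWn : (((input.headI.toList.length : Int) + 2 * i) - 0).toNat
        = input.headI.toList.length + 2 * i := by omega
    rw [hWn]
    apply List.map_congr_left
    intro X _
    simp only [Function.comp_apply]
    rw [show (0 : Int) + (X : Int) = (X : Int) from by ring]
    rw [bCol_eq input algo i k hki ((Y : Int)) ((X : Int) - 1),
      bCol_eq input algo i k hki ((Y : Int)) ((X : Int)),
      bCol_eq input algo i k hki ((Y : Int)) ((X : Int) + 1),
      spread_idx]
    rw [Q_succ_eq_conv]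
    show aBit algo _ = aBit algo _
    congr 1
    unfold idx9
    rw [show (X : Int) - 1 - i = ((X : Int) - i) - 1 from by ring,
      show (X : Int) + 1 - i = ((X : Int) - i) + 1 from by ring,
      show (Y : Int) - 1 - i = ((Y : Int) - i) - 1 from by ring,
      show (Y : Int) + 1 - i = ((Y : Int) - i) + 1 from by ring]
  · rfl

theorem strOfBool (v : Bool) : (if v then "#" else ".") = String.ofList [bchar v] := by
  cases v <;> rfl

theorem lenInput (input : List String) : PySem.List.len input = (input.length : Int) := by
  simp [PySem.List.len_eq]

theorem lenRow0 (input : List String) (hne : input ≠ []) :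
    PySem.Str.len ((PySem.List.pyGet? input 0).getD "") = (input.headI.toList.length : Int) := by
  match input, hne with
  | hd :: tl, _ =>
    rw [PySem.List.pyGet?_zero_cons]
    simp [PySem.Str.len_eq]

theorem B_init (input : List String) (algo : String) (iters : Int) (h1 : 1 ≤ iters) :
    ((PySem.List.pyRange 0 ((input.length : Int) + 2 * (iters.toNat : Int)) 1).map (fun y =>
      (PySem.List.pyRange 0 ((input.headI.toList.length : Int) + 2 * (iters.toNat : Int)) 1).map (fun x =>
        if (iters.toNat : Int) ≤ y ∧ y < (iters.toNat : Int) + (input.length : Int) ∧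
            (iters.toNat : Int) ≤ x ∧ x < (iters.toNat : Int) + (input.headI.toList.length : Int) then
          (((PySem.List.pyGet? input (y - (iters.toNat : Int))).bind
            (fun s => PySem.Str.pyGet? s (x - (iters.toNat : Int)))).getD ' ') == '#'
        else false)))
    = gridB input algo iters.toNat 0 := by
  rw [PySem.List.pyRange_one 0 ((input.length : Int) + 2 * (iters.toNat : Int)),
    PySem.List.pyRange_one 0 ((input.headI.toList.length : Int) + 2 * (iters.toNat : Int))]
  simp only [List.map_map]
  unfold gridB
  rw [show (((input.length : Int) + 2 * (iters.toNat : Int)) - 0).toNat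
      = input.length + 2 * iters.toNat from by omega,
    show (((input.headI.toList.length : Int) + 2 * (iters.toNat : Int)) - 0).toNat
      = input.headI.toList.length + 2 * iters.toNat from by omega]
  apply List.map_congr_left
  intro Y _
  simp only [Function.comp_apply]
  apply List.map_congr_left
  intro X _
  simp only [Function.comp_apply]
  rw [show (0 : Int) + (X : Int) = (X : Int) from by ring,
    show (0 : Int) + (Y : Int) = (Y : Int) from by ring]
  unfold Q
  split_ifs with ha hb hb
  · rfl
  · exfalso; omega
  · exfalso; omega
  · rfl

theorem B_iter (input : List String) (algo : String) (i : Nat) :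
    ∀ k : Nat, k ≤ i →
      (fun s => stepB algo ((input.length : Int) + 2 * i)
          ((input.headI.toList.length : Int) + 2 * i) s 0)^[k] (gridB input algo i 0, false)
        = (gridB input algo i k, bgB algo k) := by
  intro k
  induction k with
  | zero => intro _; rfl
  | succ k ih =>
    intro hk
    rw [Function.iterate_succ_apply', ih (by omega)]
    exact stepB_eq input algo i k (by omega) 0

-- ===== VERDICT (by name: the statement is the Claim_ definition above) =====
theorem enhance_img_spec : Claim_equal_enhance_img := by
  unfold Claim_equal_enhance_img
  intro input algo iters _hDom hPre
  unfold Spec_enhance_img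
  obtain ⟨hne, hrest⟩ := hPre
  by_cases hle : iters ≤ 0
  · simp only [enhance_img, enhance_img_alt]
    rw [if_pos hle, PySem.List.pyRange_one_eq_nil hle]
    simp only [List.foldl_nil]
    unfold copy_arr
    rw [List.map_map]
    conv_rhs => rw [← List.map_id input]
    apply List.map_congr_left
    intro s _
    simp only [Function.comp_apply, id_eq]
    rw [joinSingletons, String.ofList_toList]
  · have h1 : 1 ≤ iters := by omega
    obtain ⟨hrows, hlen, hchars⟩ := hrest h1
    have hiv : (iters.toNat : Int) = iters := Int.toNat_of_nonneg (by omega)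
    simp only [enhance_img, enhance_img_alt]
    rw [if_neg hle]
    rw [lenInput input, lenRow0 input hne, ← hiv]
    rw [B_init input algo iters h1]
    have hAfold : (PySem.List.pyRange 0 ((iters.toNat : Int)) 1).foldl (stepA algo) (copy_arr input, ".")
        = (gridC input algo iters.toNat, bgStr algo iters.toNat) := by
      rw [foldl_ignore (fun s => stepA algo s 0) (stepA algo) (fun s b => rfl),
        PySem.List.length_pyRange_one,
        show ((((iters.toNat : Int))) - 0).toNat = iters.toNat from by omega]
      exact A_iter input algo hne hrows ⟨hlen, hchars⟩ iters.toNat (by omega)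
    have hBfold : (PySem.List.pyRange 0 ((iters.toNat : Int)) 1).foldl
          (stepB algo ((input.length : Int) + 2 * (iters.toNat : Int))
            ((input.headI.toList.length : Int) + 2 * (iters.toNat : Int)))
          (gridB input algo iters.toNat 0, false)
        = (gridB input algo iters.toNat iters.toNat, bgB algo iters.toNat) := by
      rw [foldl_ignore (fun s => stepB algo ((input.length : Int) + 2 * (iters.toNat : Int))
            ((input.headI.toList.length : Int) + 2 * (iters.toNat : Int)) s 0)
          (stepB algo ((input.length : Int) + 2 * (iters.toNat : Int))
            ((input.headI.toList.length : Int) + 2 * (iters.toNat : Int))) (fun s b => rfl),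
        PySem.List.length_pyRange_one,
        show ((((iters.toNat : Int))) - 0).toNat = iters.toNat from by omega]
      exact B_iter input algo iters.toNat iters.toNat le_rfl
    rw [hAfold, hBfold]
    unfold gridC gridB
    dsimp only
    simp only [List.map_map]
    apply List.map_congr_left
    intro Y _
    simp only [Function.comp_apply]
    rw [List.map_map]
    congr 1
    apply List.map_congr_left
    intro X _
    simp only [Function.comp_apply]
    exact (strOfBool _).symm
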